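-- pv_equiv track=rewrite | github.com/mohankrishnaalavala/context-router | packages/language-typescript/src/language_typescript/__init__.py | _synthesize_test_name
-- ===== SOURCE A (Python) =====
-- def _synthesize_test_name(label: str, line: int) -> str:
--     """Turn a free-form test label like 'should render' into a stable symbol
--     name.  Non-identifier characters collapse to underscores, spaces become
--     underscores, and we always prefix with ``test_`` so ``_looks_like_test_name``
--     returns True.  The trailing line number disambiguates identical labels.
--     """
--     if not label:
--         return f"test_line_{line}"
--     slug_chars: list[str] = []
--     for ch in label:
--         if ch.isalnum():
--             slug_chars.append(ch)
--         elif ch in (" ", "\t", "-", "/", ":"):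
--             slug_chars.append("_")
--     slug = "".join(slug_chars).strip("_") or f"line_{line}"
--     # Collapse runs of underscores.
--     while "__" in slug:
--         slug = slug.replace("__", "_")
--     if not slug.lower().startswith("test") and not slug.lower().startswith("it_"):
--         slug = "test_" + slug
--     return slug
-- ===== SOURCE B (Python) =====
-- def _synthesize_test_name(label: str, line: int) -> str:
--     if not label:
--         return f"test_line_{line}"
--     out: list[str] = []
--     for ch in label:
--         if ch.isalnum():
--             out.append(ch)
--         elif ch in (" ", "\t", "-", "/", ":"):
--             if out and out[-1] != "_":
--                 out.append("_")
--     if out and out[-1] == "_":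
--         out.pop()
--     slug = "".join(out) or f"line_{line}"
--     if not slug.lower().startswith("test") and not slug.lower().startswith("it_"):
--         slug = "test_" + slug
--     return slug
-- ===== Notes on version B (the rewrite author's own statement) =====
-- stated objective: alternative
-- what changed: B collapses underscore runs and suppresses leading/trailing underscores inline during a single streaming pass over the label, replacing A's build-everything-then-strip('_') plus repeated replace('__','_') rescan loop.
import Mathlib
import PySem

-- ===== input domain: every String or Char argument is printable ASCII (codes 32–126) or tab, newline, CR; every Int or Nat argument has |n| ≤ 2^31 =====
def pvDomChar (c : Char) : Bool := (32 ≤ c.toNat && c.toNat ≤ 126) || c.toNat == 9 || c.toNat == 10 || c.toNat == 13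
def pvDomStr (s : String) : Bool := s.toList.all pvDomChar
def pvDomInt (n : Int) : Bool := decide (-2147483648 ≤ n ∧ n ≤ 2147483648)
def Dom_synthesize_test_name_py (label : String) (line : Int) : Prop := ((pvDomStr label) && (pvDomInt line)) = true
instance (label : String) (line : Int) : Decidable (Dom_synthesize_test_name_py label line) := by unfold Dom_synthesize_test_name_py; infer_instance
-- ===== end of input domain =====

-- B does A's collapse-underscore-runs / strip-underscores work inline in one streaming pass
-- instead of A's build-everything, strip('_'), then repeated replace("__","_") rescan loop.

-- shared classification helpers (both Pythons test `ch.isalnum()` / `ch in (" ", "\t", "-", "/", ":")`)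
def pvSep (c : Char) : Bool := [' ', '\t', '-', '/', ':'].contains c

-- ===== PORT A =====
-- hand ports of `"__" in slug` and `slug.replace("__", "_")`, exact for the literal
-- two-character pattern: a substring test for "__" and left-to-right non-overlapping replacement.
def pvHasDD : List Char → Bool
  | c :: d :: r => (c == '_' && d == '_') || pvHasDD (d :: r)
  | _ => false

def pvRep : List Char → List Char
  | [] => []
  | [c] => [c]
  | c :: d :: r => if c = '_' ∧ d = '_' then '_' :: pvRep r else c :: pvRep (d :: r)

theorem pvRep_length_le : ∀ s : List Char, (pvRep s).length ≤ s.length := by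
  intro s
  induction s using pvRep.induct with
  | case1 => simp [pvRep]
  | case2 c => simp [pvRep]
  | case3 c d r h ih => simp [pvRep, h, ih]; omega
  | case4 c d r h ih => simp [pvRep, h]; simpa using ih

theorem pvRep_length_lt : ∀ s : List Char, pvHasDD s = true → (pvRep s).length < s.length := by
  intro s
  induction s using pvRep.induct with
  | case1 => simp [pvHasDD]
  | case2 c => simp [pvHasDD]
  | case3 c d r h ih =>
      intro _
      have := pvRep_length_le r
      simp only [pvRep, if_pos h, List.length_cons]
      omega
  | case4 c d r h ih =>
      intro hdd
      have hdd' : pvHasDD (d :: r) = true := by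
        rcases c_eq : (c == '_') with _ | _ <;> rcases d_eq : (d == '_') with _ | _ <;>
          simp [pvHasDD, c_eq, d_eq] at hdd ⊢ <;> try exact hdd
        exact absurd ⟨by simpa using c_eq, by simpa using d_eq⟩ h
      have := ih hdd'
      simp only [List.length_cons] at this
      simp only [pvRep, if_neg h, List.length_cons]
      omega

-- port of `while "__" in slug: slug = slug.replace("__", "_")`
def pvCollapse (s : List Char) : List Char :=
  if pvHasDD s then pvCollapse (pvRep s) else s
termination_by s.length
decreasing_by exact pvRep_length_lt _ (by assumption)

def synthesize_test_name_py (label : String) (line : Int) : String :=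
  if label = "" then "test_line_" ++ PySem.Int.toStr line
  else
    -- slug_chars accumulation loop
    let slugChars := label.toList.foldl (fun acc ch =>
      if PySem.Chars.isalnum ch then acc ++ [ch]
      else if pvSep ch then acc ++ ['_'] else acc) []
    -- `"".join(slug_chars).strip("_") or f"line_{line}"`
    let stripped := PySem.Chars.stripChars slugChars ['_']
    let slug0 := if stripped = [] then ("line_" ++ PySem.Int.toStr line).toList else stripped
    let slug := pvCollapse slug0
    let slugS := String.ofList slug
    if !(PySem.Str.startswith (PySem.Str.lower slugS) "test")
        && !(PySem.Str.startswith (PySem.Str.lower slugS) "it_")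
    then "test_" ++ slugS else slugS

-- ===== PORT B =====
-- single streaming pass: append alnum chars; on a separator append '_' only when the
-- accumulator is nonempty and does not already end in '_'; drop everything else.
def pvBLoop (acc : List Char) : List Char → List Char
  | [] => acc
  | ch :: rest =>
    if PySem.Chars.isalnum ch then pvBLoop (acc ++ [ch]) rest
    else if pvSep ch then
      (if acc ≠ [] ∧ acc.getLast? ≠ some '_' then pvBLoop (acc ++ ['_']) rest
       else pvBLoop acc rest)
    else pvBLoop acc rest

def synthesize_test_name_py_alt (label : String) (line : Int) : String :=
  if label = "" then "test_line_" ++ PySem.Int.toStr line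
  else
    let out := pvBLoop [] label.toList
    -- `if out and out[-1] == "_": out.pop()`
    let out := if out.getLast? = some '_' then out.dropLast else out
    -- `slug = "".join(out) or f"line_{line}"`
    let slugS := if out = [] then "line_" ++ PySem.Int.toStr line else String.ofList out
    if !(PySem.Str.startswith (PySem.Str.lower slugS) "test")
        && !(PySem.Str.startswith (PySem.Str.lower slugS) "it_")
    then "test_" ++ slugS else slugS

-- ===== PRECONDITION & SPEC =====
def Spec_synthesize_test_name_py (label : String) (line : Int) (out : String) : Prop := out = synthesize_test_name_py_alt label line
instance (label : String) (line : Int) (out : String) : Decidable (Spec_synthesize_test_name_py label line out) := by unfold Spec_synthesize_test_name_py; infer_instance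

-- ===== CLAIM (what is proved, stated in full; the proofs are below) =====
def Claim_equal_synthesize_test_name_py : Prop := ∀ (label : String) (line : Int), Dom_synthesize_test_name_py label line → Spec_synthesize_test_name_py label line (synthesize_test_name_py label line)

-- ===== LEMMAS AND PROOFS =====

-- the underscore-collapsing automaton: state true = "skip underscores", false = "may emit one"
def pvSq : Bool → List Char → List Char
  | _, [] => []
  | st, c :: r => if c = '_' then (if st then pvSq true r else '_' :: pvSq true r) else c :: pvSq false r

def pvFst : Bool → List Char → Bool
  | st, [] => st
  | _, c :: r => pvFst (c == '_') r

theorem pvSq_rep (s : List Char) : ∀ st, pvSq st (pvRep s) = pvSq st s := by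
  induction s using pvRep.induct with
  | case1 => intro st; rfl
  | case2 c => intro st; rfl
  | case3 c d r h ih =>
      obtain ⟨rfl, rfl⟩ := h
      intro st
      cases st <;> simp [pvRep, pvSq, ih]
  | case4 c d r h ih =>
      intro st
      simp only [pvRep, if_neg h, pvSq]
      split_ifs <;> simp_all [pvSq]

theorem pvSq_noDD (s : List Char) (h : pvHasDD s = false) :
    pvSq false s = s ∧ (s.head? ≠ some '_' → pvSq true s = s) := by
  induction s with
  | nil => exact ⟨rfl, fun _ => rfl⟩
  | cons c r ih =>
      have hr : pvHasDD r = false := by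
        cases r with
        | nil => rfl
        | cons d r' => simp [pvHasDD] at h; exact h.2
      have hh : ¬ (c = '_' ∧ r.head? = some '_') := by
        rintro ⟨rfl, hhd⟩
        cases r with
        | nil => simp at hhd
        | cons d r' =>
            simp at hhd
            subst hhd
            simp [pvHasDD] at h
      constructor
      · by_cases hc : c = '_'
        · subst hc
          have : r.head? ≠ some '_' := fun hx => hh ⟨rfl, hx⟩
          simp [pvSq, (ih hr).2 this]
        · simp [pvSq, hc, (ih hr).1]
      · intro hcne
        have hc : ¬ c = '_' := by simpa using hcne
        simp [pvSq, hc, (ih hr).1]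

theorem pvCollapse_eq_sq (s : List Char) : pvCollapse s = pvSq false s := by
  induction s using pvCollapse.induct with
  | case1 s h ih =>
      rw [pvCollapse, if_pos h, ih, pvSq_rep]
  | case2 s h =>
      rw [pvCollapse, if_neg h]
      exact ((pvSq_noDD s (by simpa using h)).1).symm

theorem pvSq_append (xs : List Char) : ∀ ys st, pvSq st (xs ++ ys) = pvSq st xs ++ pvSq (pvFst st xs) ys := by
  induction xs with
  | nil => intro ys st; rfl
  | cons c r ih =>
      intro ys st
      by_cases hc : c = '_'
      · subst hc
        cases st <;> simp [pvSq, pvFst, ih]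
      · have hb : (c == '_') = false := by simpa using hc
        cases st <;> simp [pvSq, pvFst, hc, hb, ih]

theorem pvFst_false (t : List Char) : ∀ st, t ≠ [] → t.getLast? ≠ some '_' → pvFst st t = false := by
  induction t with
  | nil => intro st h; exact absurd rfl h
  | cons c r ih =>
      intro st _ hl
      cases r with
      | nil =>
          have hc : ¬ c = '_' := by simpa using hl
          have hb : (c == '_') = false := by simpa using hc
          simp [pvFst, hb]
      | cons d r' =>
          have h2 : (d :: r').getLast? ≠ some '_' := by
            rw [List.getLast?_cons_cons] at hl; exact hl
          simp only [pvFst]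
          exact ih (c == '_') (by simp) h2

theorem pvSq_true_nil (r : List Char) (h : pvSq true r = []) : pvFst true r = true := by
  induction r with
  | nil => rfl
  | cons c r' ih =>
      by_cases hc : c = '_'
      · subst hc; simp [pvSq] at h; simpa [pvFst] using ih h
      · simp [pvSq, hc] at h

theorem pvSq_empty_iff (x : List Char) : pvSq false x = [] ↔ x = [] := by
  cases x with
  | nil => simp [pvSq]
  | cons c r => by_cases hc : c = '_' <;> simp [pvSq, hc]

theorem pvLast_sq (t : List Char) : ∀ st, pvFst st t = false → (pvSq st t).getLast? ≠ some '_' := by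
  induction t with
  | nil => intro st _; simp [pvSq]
  | cons c r ih =>
      intro st hf
      by_cases hc : c = '_'
      · subst hc
        have hf' : pvFst true r = false := by simpa [pvFst] using hf
        cases st with
        | true => simpa [pvSq] using ih true hf'
        | false =>
            have hne : pvSq true r ≠ [] := fun h => by simp [pvSq_true_nil r h] at hf'
            cases hq : pvSq true r with
            | nil => exact absurd hq hne
            | cons a u =>
                have := ih true hf'
                rw [hq] at this
                simpa [pvSq, hq, List.getLast?_cons_cons] using this
      · have hb : (c == '_') = false := by simpa using hc
        have hf' : pvFst false r = false := by simpa [pvFst, hb] using hf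
        cases hq : pvSq false r with
        | nil => simpa [pvSq, hc, hq] using hc
        | cons a u =>
            have := ih false hf'
            rw [hq] at this
            simpa [pvSq, hc, hq, List.getLast?_cons_cons] using this

theorem pvSq_underscores (w : List Char) (h : ∀ c ∈ w, c = '_') :
    pvSq true w = [] ∧ (w ≠ [] → pvSq false w = ['_']) := by
  induction w with
  | nil => exact ⟨rfl, fun h => absurd rfl h⟩
  | cons c r ih =>
      have hc : c = '_' := h c (by simp)
      subst hc
      have ih' := ih (fun c hc => h c (by simp [hc]))
      exact ⟨by simp [pvSq, ih'.1], fun _ => by simp [pvSq, ih'.1]⟩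

theorem pvSq_dropWhile (L : List Char) : pvSq true L = pvSq false (L.dropWhile (fun c => c == '_')) := by
  induction L with
  | nil => rfl
  | cons c r ih =>
      by_cases hc : c = '_'
      · subst hc; simpa [pvSq, List.dropWhile_cons] using ih
      · have hb : (c == '_') = false := by simpa using hc
        simp [pvSq, List.dropWhile_cons, hb, hc]

theorem pvHead_dropWhile {p : Char → Bool} : ∀ (l : List Char) {a : Char},
    (l.dropWhile p).head? = some a → p a = false := by
  intro l
  induction l with
  | nil => intro a h; simp [List.dropWhile] at h
  | cons c r ih =>
      intro a h
      rw [List.dropWhile_cons] at h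
      by_cases hc : p c
      · rw [if_pos hc] at h; exact ih h
      · rw [if_neg hc] at h
        have : c = a := by simpa using h
        subst this
        simpa using hc

-- dropping one trailing underscore from the automaton output equals running it on the stripped list
theorem pvTrim_core (t w : List Char) (htl : t.getLast? ≠ some '_') (hw : ∀ c ∈ w, c = '_') :
    (if (pvSq false (t ++ w)).getLast? = some '_' then (pvSq false (t ++ w)).dropLast
     else pvSq false (t ++ w)) = pvSq false t := by
  by_cases ht : t = []
  · subst ht
    simp only [List.nil_append]
    cases hwn : w with
    | nil => simp [pvSq]
    | cons b v =>
        have h := (pvSq_underscores w hw).2 (by rw [hwn]; simp)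
        rw [← hwn, h]
        simp [pvSq]
  · have hfst : pvFst false t = false := pvFst_false t false ht htl
    rw [pvSq_append, hfst]
    cases hwn : w with
    | nil =>
        subst hwn
        simp only [pvSq, List.append_nil]
        exact if_neg (pvLast_sq t false hfst)
    | cons b v =>
        have h := (pvSq_underscores w hw).2 (by rw [hwn]; simp)
        rw [← hwn, h, List.getLast?_concat, if_pos rfl, List.dropLast_concat]

theorem pvTrim_main (L : List Char) :
    pvSq false (PySem.Chars.stripChars L ['_']) =
      (if (pvSq true L).getLast? = some '_' then (pvSq true L).dropLast else pvSq true L) := by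
  have hq : (fun c : Char => List.contains ['_'] c) = (fun c : Char => c == '_') := by
    funext c; simp; rfl
  have hstrip : PySem.Chars.stripChars L ['_'] =
      ((List.dropWhile (fun c : Char => c == '_') (List.dropWhile (fun c : Char => c == '_') L).reverse).reverse) := by
    simp only [PySem.Chars.stripChars]
    rw [hq]
  rw [pvSq_dropWhile, hstrip]
  have hsplit : List.dropWhile (fun c : Char => c == '_') L =
      (List.dropWhile (fun c : Char => c == '_') (List.dropWhile (fun c : Char => c == '_') L).reverse).reverse
        ++ (List.takeWhile (fun c : Char => c == '_') (List.dropWhile (fun c : Char => c == '_') L).reverse).reverse := by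
    conv_lhs => rw [← List.reverse_reverse (List.dropWhile (fun c : Char => c == '_') L),
      ← List.takeWhile_append_dropWhile (p := fun c : Char => c == '_')
        (l := (List.dropWhile (fun c : Char => c == '_') L).reverse)]
    rw [List.reverse_append]
  have htl : ((List.dropWhile (fun c : Char => c == '_') (List.dropWhile (fun c : Char => c == '_') L).reverse).reverse).getLast? ≠ some '_' := by
    rw [List.getLast?_reverse]
    intro h0
    have := pvHead_dropWhile _ h0
    simp at this
  have hwall : ∀ c ∈ (List.takeWhile (fun c : Char => c == '_') (List.dropWhile (fun c : Char => c == '_') L).reverse).reverse, c = '_' := by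
    intro c hc
    have := List.mem_takeWhile_imp (List.mem_reverse.mp hc)
    simpa using this
  conv_rhs => rw [hsplit]
  exact (pvTrim_core _ _ htl hwall).symm

-- A's accumulation loop produces the classified character list
def pvFilt : List Char → List Char
  | [] => []
  | c :: r => if PySem.Chars.isalnum c then c :: pvFilt r
              else if pvSep c then '_' :: pvFilt r else pvFilt r

theorem pvFoldA (l : List Char) : ∀ acc,
    l.foldl (fun acc ch =>
      if PySem.Chars.isalnum ch then acc ++ [ch]
      else if pvSep ch then acc ++ ['_'] else acc) acc = acc ++ pvFilt l := by
  induction l with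
  | nil => intro acc; simp [pvFilt]
  | cons c r ih =>
      intro acc
      by_cases h1 : PySem.Chars.isalnum c
      · simp [pvFilt, h1, List.foldl_cons, ih]
      · by_cases h2 : pvSep c <;> simp [pvFilt, h1, h2, List.foldl_cons, ih]

theorem pvAlnum_ne_underscore {c : Char} (h : PySem.Chars.isalnum c = true) : c ≠ '_' := by
  rintro rfl
  rw [(by decide : PySem.Chars.isalnum '_' = false)] at h
  cases h

-- B's loop is the automaton run over the classified list
theorem pvBLoop_sq (l : List Char) : ∀ acc,
    pvBLoop acc l = acc ++ pvSq (decide (acc = [] ∨ acc.getLast? = some '_')) (pvFilt l) := by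
  induction l with
  | nil => intro acc; simp [pvBLoop, pvFilt, pvSq]
  | cons c r ih =>
      intro acc
      by_cases h1 : PySem.Chars.isalnum c
      · have hc := pvAlnum_ne_underscore h1
        have : ((acc ++ [c]) = [] ∨ (acc ++ [c]).getLast? = some '_') = False := by
          simp [List.getLast?_concat, hc]
        simp [pvBLoop, h1, pvFilt, ih, pvSq, hc, this]
      · by_cases h2 : pvSep c
        · by_cases h3 : acc ≠ [] ∧ acc.getLast? ≠ some '_'
          · have hst : (acc = [] ∨ acc.getLast? = some '_') = False := by
              simp only [eq_iff_iff, iff_false]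
              rintro (h | h)
              exacts [h3.1 h, h3.2 h]
            have : ((acc ++ ['_']) = [] ∨ (acc ++ ['_']).getLast? = some '_') = True := by
              simp [List.getLast?_concat]
            simp [pvBLoop, h1, h2, h3, pvFilt, ih, pvSq, hst, this]
          · have hst : (acc = [] ∨ acc.getLast? = some '_') = True := by
              simp only [eq_iff_iff, iff_true]
              by_cases h4 : acc = []
              · exact Or.inl h4
              · right
                by_contra h5
                exact h3 ⟨h4, h5⟩
            simp [pvBLoop, h1, h2, h3, pvFilt, ih, pvSq, hst]
        · simp [pvBLoop, h1, h2, pvFilt, ih]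

-- the fallback string f"line_{line}" contains no double underscore
theorem pvDigitChar_ne (m : Nat) : Nat.digitChar m ≠ '_' := by
  rcases lt_or_ge m 16 with h | h
  · interval_cases m <;> decide
  · simp only [Nat.digitChar]
    rw [if_neg (by omega), if_neg (by omega), if_neg (by omega), if_neg (by omega),
      if_neg (by omega), if_neg (by omega), if_neg (by omega), if_neg (by omega),
      if_neg (by omega), if_neg (by omega), if_neg (by omega), if_neg (by omega),
      if_neg (by omega), if_neg (by omega), if_neg (by omega), if_neg (by omega)]
    decide

theorem pvToDigitsCore_ne : ∀ (f n : Nat) (acc : List Char), (∀ c ∈ acc, c ≠ '_') →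
    ∀ c ∈ Nat.toDigitsCore 10 f n acc, c ≠ '_' := by
  intro f
  induction f with
  | zero => intro n acc hacc; simpa [Nat.toDigitsCore] using hacc
  | succ f ih =>
      intro n acc hacc c hc
      rw [Nat.toDigitsCore] at hc
      by_cases h0 : n / 10 = 0
      · simp only [h0, if_pos rfl] at hc
        rcases List.mem_cons.mp hc with rfl | hmem
        · exact pvDigitChar_ne _
        · exact hacc c hmem
      · simp only [h0, if_neg h0] at hc
        refine ih _ _ ?_ c hc
        intro c' hc'
        rcases List.mem_cons.mp hc' with rfl | hmem
        · exact pvDigitChar_ne _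
        · exact hacc c' hmem

theorem pvToChars_ne (n : Int) : ∀ c ∈ PySem.Int.toChars n, c ≠ '_' := by
  intro c hc
  unfold PySem.Int.toChars at hc
  split_ifs at hc with h
  · rcases List.mem_cons.mp hc with rfl | hmem
    · decide
    · exact pvToDigitsCore_ne _ _ _ (by simp) c hmem
  · exact pvToDigitsCore_ne _ _ _ (by simp) c hc

theorem pvHasDD_no (w : List Char) (h : ∀ c ∈ w, c ≠ '_') : pvHasDD w = false := by
  induction w with
  | nil => rfl
  | cons c r ih =>
      cases r with
      | nil => rfl
      | cons d r' =>
          have hc : c ≠ '_' := h c (by simp)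
          have := ih (fun x hx => h x (by simp [List.mem_cons] at hx ⊢; tauto))
          simp [pvHasDD, hc, this]

theorem pvFallback_noDD (line : Int) :
    pvHasDD ('l' :: 'i' :: 'n' :: 'e' :: '_' :: PySem.Int.toChars line) = false := by
  have hno := pvToChars_ne line
  cases hw : PySem.Int.toChars line with
  | nil => rfl
  | cons c r =>
      have hc : c ≠ '_' := hno c (by rw [hw]; simp)
      have hrest : pvHasDD (c :: r) = false :=
        pvHasDD_no _ (fun x hx => hno x (by rw [hw]; exact hx))
      simp [pvHasDD, hc, hrest]

-- ===== VERDICT (by name: the statement is the Claim_ definition above) =====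
theorem synthesize_test_name_py_spec : Claim_equal_synthesize_test_name_py := by
  intro label line _
  unfold Spec_synthesize_test_name_py synthesize_test_name_py synthesize_test_name_py_alt
  by_cases hlab : label = ""
  · simp [hlab]
  · simp only [hlab, if_neg (by exact hlab)]
    rw [pvFoldA, List.nil_append, pvBLoop_sq, List.nil_append]
    set L : List Char := pvFilt label.toList with hL
    have hst : (decide (([] : List Char) = [] ∨ ([] : List Char).getLast? = some '_')) = true := by decide
    rw [hst]
    set stripped : List Char := PySem.Chars.stripChars L ['_'] with hstr
    have key : pvSq false stripped =
        (if (pvSq true L).getLast? = some '_' then (pvSq true L).dropLast else pvSq true L) :=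
      pvTrim_main L
    by_cases hemp : stripped = []
    · -- both sides take the f"line_{line}" fallback
      have hout : (if (pvSq true L).getLast? = some '_' then (pvSq true L).dropLast else pvSq true L) = [] := by
        rw [← key, hemp]; rfl
      have hcoll : pvCollapse ('l' :: 'i' :: 'n' :: 'e' :: '_' :: PySem.Int.toChars line)
          = 'l' :: 'i' :: 'n' :: 'e' :: '_' :: PySem.Int.toChars line := by
        rw [pvCollapse_eq_sq]
        exact (pvSq_noDD _ (pvFallback_noDD line)).1
      simp [hemp, hout, hcoll]
      have hlist : ('l' :: 'i' :: 'n' :: 'e' :: '_' :: PySem.Int.toChars line)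
          = ("line_" ++ PySem.Int.toStr line).toList := by
        rw [String.toList_append, PySem.Int.toList_toStr]; rfl
      rw [hlist, String.ofList_toList]
    · have hne : pvSq false stripped ≠ [] := fun h => hemp ((pvSq_empty_iff stripped).mp h)
      have hout : (if (pvSq true L).getLast? = some '_' then (pvSq true L).dropLast else pvSq true L) ≠ [] := by
        rw [← key]; exact hne
      simp [hemp, hout, pvCollapse_eq_sq, key]
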